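-- pv_equiv track=rewrite | github.com/0nse/WikiWho | scripts/AUC/AUC.py | calculateYAxis
-- ===== SOURCE A (Python) =====
-- def calculateYAxis(values):
--   ''' Calculates a ROC curve from the values. '''
--   y = [0]
--   currentY = 0
--   for (_, prediction) in values:
--     if prediction:
--       currentY += 1
--     else:
--       y.append(currentY)
--   return y
-- ===== SOURCE B (Python) =====
-- def calculateYAxis(values):
--   ''' Calculates a ROC curve from the values. '''
--   # Phase 1: prefix table of cumulative true-prediction counts.
--   cum = []
--   total = 0
--   for (_, prediction) in values:
--     total += 1 if prediction else 0
--     cum.append(total)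
--   # Phase 2: select the prefix count at every false-prediction position.
--   return [0] + [c for ((_, p), c) in zip(values, cum) if not p]
-- ===== Notes on version B (the rewrite author's own statement) =====
-- stated objective: alternative
-- what changed: Replaces the single conditional-append loop over a running counter with a two-phase build-then-select: first a full cumulative-true-count prefix table, then a zip/filter pass collecting the prefix count at each false-prediction position.
import Mathlib
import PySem

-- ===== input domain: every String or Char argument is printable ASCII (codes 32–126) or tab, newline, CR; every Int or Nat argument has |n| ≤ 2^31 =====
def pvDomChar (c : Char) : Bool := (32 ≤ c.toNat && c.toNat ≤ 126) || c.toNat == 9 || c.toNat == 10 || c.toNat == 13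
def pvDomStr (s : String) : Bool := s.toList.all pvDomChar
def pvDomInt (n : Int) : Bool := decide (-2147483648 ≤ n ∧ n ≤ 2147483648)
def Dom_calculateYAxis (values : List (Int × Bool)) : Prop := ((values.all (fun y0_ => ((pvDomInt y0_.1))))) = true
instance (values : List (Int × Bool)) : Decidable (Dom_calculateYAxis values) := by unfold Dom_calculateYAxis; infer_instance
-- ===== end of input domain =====

-- B rebuilds the ROC y-axis by a two-phase build-then-select (prefix table of cumulative
-- true counts, then selection at false positions) instead of A's single conditional-append loop.


-- ===== PORT A =====
-- state = (y, currentY); 'if prediction: currentY += 1 else: y.append(currentY)'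
def calculateYAxis (values : List (Int × Bool)) : List Int :=
  (values.foldl
    (fun (st : List Int × Int) vp =>
      if vp.2 then (st.1, st.2 + 1) else (st.1 ++ [st.2], st.2))
    ([0], 0)).1

-- ===== PORT B =====
-- Phase 1 of Source B: build the prefix table cum with running total.
def cumTable (values : List (Int × Bool)) : List Int :=
  (values.foldl
    (fun (st : Int × List Int) vp =>
      let t := st.1 + (if vp.2 then 1 else 0)
      (t, st.2 ++ [t]))
    (0, [])).2

-- Phase 2 of Source B: [0] + [c for ((_, p), c) in zip(values, cum) if not p]
def calculateYAxis_alt (values : List (Int × Bool)) : List Int :=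
  [0] ++ ((values.zip (cumTable values)).filterMap
    (fun x => if x.1.2 then none else some x.2))

-- ===== PRECONDITION & SPEC =====
def Spec_calculateYAxis (values : List (Int × Bool)) (out : List Int) : Prop := out = calculateYAxis_alt values
instance (values : List (Int × Bool)) (out : List Int) : Decidable (Spec_calculateYAxis values out) := by unfold Spec_calculateYAxis; infer_instance

-- ===== CLAIM (what is proved, stated in full; the proofs are below) =====
def Claim_equal_calculateYAxis : Prop := ∀ (values : List (Int × Bool)), Dom_calculateYAxis values → Spec_calculateYAxis values (calculateYAxis values)

-- ===== LEMMAS AND PROOFS =====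

-- common recursive characterisation: the false-position prefix counts starting from count c
def rocTail : List (Int × Bool) → Int → List Int
  | [], _ => []
  | vp :: rest, c => if vp.2 then rocTail rest (c + 1) else c :: rocTail rest c

theorem foldA_eq (values : List (Int × Bool)) (y : List Int) (c : Int) :
    (values.foldl
      (fun (st : List Int × Int) vp =>
        if vp.2 then (st.1, st.2 + 1) else (st.1 ++ [st.2], st.2))
      (y, c)).1 = y ++ rocTail values c := by
  induction values generalizing y c with
  | nil => simp [rocTail]
  | cons vp rest ih =>
    by_cases h : vp.2 <;> simp [rocTail, h, ih, List.append_assoc]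

def preTable : List (Int × Bool) → Int → List Int
  | [], _ => []
  | vp :: rest, t =>
    (t + (if vp.2 then 1 else 0)) :: preTable rest (t + (if vp.2 then 1 else 0))

theorem foldB_eq (values : List (Int × Bool)) (t : Int) (acc : List Int) :
    (values.foldl
      (fun (st : Int × List Int) vp =>
        let u := st.1 + (if vp.2 then 1 else 0)
        (u, st.2 ++ [u]))
      (t, acc)).2 = acc ++ preTable values t := by
  induction values generalizing t acc with
  | nil => simp [preTable]
  | cons vp rest ih =>
    simp [preTable, ih, List.append_assoc]

theorem select_eq (values : List (Int × Bool)) (t : Int) :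
    (values.zip (preTable values t)).filterMap
      (fun x => if x.1.2 then none else some x.2) = rocTail values t := by
  induction values generalizing t with
  | nil => simp [preTable, rocTail]
  | cons vp rest ih =>
    by_cases h : vp.2 <;> simp [preTable, rocTail, h, ih]

-- ===== VERDICT (by name: the statement is the Claim_ definition above) =====
theorem calculateYAxis_spec : Claim_equal_calculateYAxis := by
  intro values _
  unfold Spec_calculateYAxis calculateYAxis calculateYAxis_alt cumTable
  rw [foldA_eq, foldB_eq, List.nil_append, select_eq]
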